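-- pv_equiv track=rewrite | github.com/brendenrossin/SecondBrain | src/secondbrain/stores/lexical.py | _escape_fts_query
-- ===== SOURCE A (Python) =====
-- def _escape_fts_query(query: str) -> str:
--     """Escape special characters in FTS5 query."""
--     # Remove special characters that might break FTS5
--     special_chars = ['"', "'", "(", ")", "*", "-", "+", ":", "^", "~"]
--     escaped = query
--     for char in special_chars:
--         escaped = escaped.replace(char, " ")
--
--     # Split into words and wrap each in quotes for exact matching
--     words = escaped.split()
--     if not words:
--         return '""'
--
--     # Join words with OR for more flexible matching
--     return " OR ".join(f'"{word}"' for word in words if word)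
-- ===== SOURCE B (Python) =====
-- def _escape_fts_query(query: str) -> str:
--     """Escape special characters in FTS5 query (single-pass scan)."""
--     special = '"\'()*-+:^~'
--     words = []
--     buf = []
--     for ch in query:
--         if ch in special or ch.isspace():
--             if buf:
--                 words.append("".join(buf))
--                 buf = []
--         else:
--             buf.append(ch)
--     if buf:
--         words.append("".join(buf))
--     if not words:
--         return '""'
--     return " OR ".join('"' + w + '"' for w in words)
-- ===== Notes on version B (the rewrite author's own statement) =====
-- stated objective: alternative
-- what changed: Replaced A's ten sequential str.replace passes followed by split() with a single left-to-right character scan that maintains a current-word buffer and flushes it at special or whitespace characters, then joins the collected words.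
import Mathlib
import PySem

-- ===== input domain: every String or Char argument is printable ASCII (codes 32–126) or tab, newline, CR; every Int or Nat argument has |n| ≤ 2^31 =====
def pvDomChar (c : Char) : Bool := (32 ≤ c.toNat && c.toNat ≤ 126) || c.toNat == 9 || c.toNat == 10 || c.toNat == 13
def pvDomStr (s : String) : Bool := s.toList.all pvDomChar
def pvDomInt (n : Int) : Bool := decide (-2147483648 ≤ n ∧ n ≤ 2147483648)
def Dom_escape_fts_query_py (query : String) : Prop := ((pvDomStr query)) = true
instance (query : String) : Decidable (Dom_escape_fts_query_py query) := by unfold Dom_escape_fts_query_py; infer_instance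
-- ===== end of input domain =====

-- B replaces A's ten-pass replace-then-split pipeline by a single character scan with a word buffer; objective: alternative decomposition (same cost).

-- ===== PORT A =====
def escape_fts_query_py (query : String) : String :=
  let special_chars : List String := ["\"", "'", "(", ")", "*", "-", "+", ":", "^", "~"]
  let escaped := special_chars.foldl (fun e ch => PySem.Str.replace e ch " ") query
  let words := PySem.Str.split₀ escaped
  if words.isEmpty then "\"\""
  else PySem.Str.join " OR " ((words.filter (fun w => w ≠ "")).map (fun w => "\"" ++ w ++ "\""))

-- ===== PORT B =====
def pvSpecialChars : List Char := ['"', '\'', '(', ')', '*', '-', '+', ':', '^', '~']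

-- the single-pass word scan of Source B: flush the buffer at special/space chars, else extend it
def pvScanB : List Char → List Char → List (List Char)
  | [], buf => if buf.isEmpty then [] else [buf]
  | c :: rest, buf =>
    if pvSpecialChars.contains c || PySem.Chars.isspace c then
      if buf.isEmpty then pvScanB rest [] else buf :: pvScanB rest []
    else pvScanB rest (buf ++ [c])

def escape_fts_query_py_alt (query : String) : String :=
  let words := pvScanB query.toList []
  if words.isEmpty then "\"\""
  else PySem.Str.join " OR " (words.map (fun w => "\"" ++ String.ofList w ++ "\""))

-- ===== PRECONDITION & SPEC =====
def Spec_escape_fts_query_py (query : String) (out : String) : Prop := out = escape_fts_query_py_alt query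
instance (query : String) (out : String) : Decidable (Spec_escape_fts_query_py query out) := by unfold Spec_escape_fts_query_py; infer_instance

-- ===== CLAIM (what is proved, stated in full; the proofs are below) =====
def Claim_equal_escape_fts_query_py : Prop := ∀ (query : String), Dom_escape_fts_query_py query → Spec_escape_fts_query_py query (escape_fts_query_py query)

-- ===== LEMMAS AND PROOFS =====

-- replacing one special char by a space, as a per-character function
def pvF (a c : Char) : Char := if c = a then ' ' else c

-- the substitution A's ten replace passes amount to
def pvSubst (c : Char) : Char := if pvSpecialChars.contains c then ' ' else c

lemma pvReplace_go_single (a : Char) :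
    ∀ (l : List Char) (fuel : Nat) (acc : List Char), l.length ≤ fuel →
      PySem.Chars.replace.go [a] [' '] fuel l acc
        = acc.reverse ++ l.map (pvF a) := by
  intro l
  induction l with
  | nil => intro fuel acc _; cases fuel <;> simp [PySem.Chars.replace.go]
  | cons c t ih =>
    intro fuel acc h
    cases fuel with
    | zero => simp at h
    | succ n =>
      simp only [List.length_cons, Nat.succ_le_succ_iff] at h
      by_cases hac : a = c
      · subst hac
        simp [PySem.Chars.replace.go, List.isPrefixOf, ih n (' ' :: acc) h, pvF]
      · simp [PySem.Chars.replace.go, List.isPrefixOf, Ne.symm hac, hac,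
          ih n (c :: acc) h, pvF]

lemma pvReplace_single (a : Char) (cs : List Char) :
    PySem.Chars.replace cs [a] [' '] = cs.map (pvF a) := by
  simpa [PySem.Chars.replace] using pvReplace_go_single a cs cs.length [] le_rfl

lemma pvComp_eq_subst (c : Char) :
    pvF '~' (pvF '^' (pvF ':' (pvF '+' (pvF '-' (pvF '*' (pvF ')' (pvF '(' (pvF '\'' (pvF '"' c))))))))) = pvSubst c := by
  by_cases h1 : c = '"'; · subst h1; decide
  by_cases h2 : c = '\''; · subst h2; decide
  by_cases h3 : c = '('; · subst h3; decide
  by_cases h4 : c = ')'; · subst h4; decide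
  by_cases h5 : c = '*'; · subst h5; decide
  by_cases h6 : c = '-'; · subst h6; decide
  by_cases h7 : c = '+'; · subst h7; decide
  by_cases h8 : c = ':'; · subst h8; decide
  by_cases h9 : c = '^'; · subst h9; decide
  by_cases h10 : c = '~'; · subst h10; decide
  simp [pvF, pvSubst, pvSpecialChars, h1, h2, h3, h4, h5, h6, h7, h8, h9, h10]

lemma pvEscaped_toList (q : String) :
    (["\"", "'", "(", ")", "*", "-", "+", ":", "^", "~"].foldl
        (fun e ch => PySem.Str.replace e ch " ") q).toList
      = q.toList.map pvSubst := by
  simp only [List.foldl, PySem.Str.toList_replace]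
  have hs : (" " : String).toList = [' '] := rfl
  simp only [hs]
  rw [show ("\"" : String).toList = ['"'] from rfl,
      show ("'" : String).toList = ['\''] from rfl,
      show ("(" : String).toList = ['('] from rfl,
      show (")" : String).toList = [')'] from rfl,
      show ("*" : String).toList = ['*'] from rfl,
      show ("+" : String).toList = ['+'] from rfl,
      show ("-" : String).toList = ['-'] from rfl,
      show (":" : String).toList = [':'] from rfl,
      show ("^" : String).toList = ['^'] from rfl,
      show ("~" : String).toList = ['~'] from rfl]
  simp only [pvReplace_single, List.map_map]
  refine List.map_congr_left (fun c _ => ?_)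
  simpa [Function.comp] using pvComp_eq_subst c

lemma pvIsspace_subst (c : Char) :
    PySem.Chars.isspace (pvSubst c) = (pvSpecialChars.contains c || PySem.Chars.isspace c) := by
  unfold pvSubst
  cases h : pvSpecialChars.contains c
  · rw [if_neg (by simp), Bool.false_or]
  · rw [if_pos rfl, Bool.true_or]
    decide

lemma pvSubst_of_not_special (c : Char) (h : pvSpecialChars.contains c = false) :
    pvSubst c = c := by unfold pvSubst; rw [if_neg (by simp_all)]

lemma pvSplit_go_scan :
    ∀ (cs cur : List Char) (acc : List (List Char)),
      PySem.Chars.split₀.go (cs.map pvSubst) cur acc = acc.reverse ++ pvScanB cs cur.reverse := by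
  intro cs
  induction cs with
  | nil =>
    intro cur acc
    by_cases h : cur.isEmpty <;>
      simp_all [PySem.Chars.split₀.go, pvScanB, List.isEmpty_iff]
  | cons c t ih =>
    intro cur acc
    simp only [List.map_cons, PySem.Chars.split₀.go, pvScanB, pvIsspace_subst]
    by_cases hsp : (pvSpecialChars.contains c || PySem.Chars.isspace c)
    · simp only [hsp, if_pos]
      by_cases hc : cur.isEmpty
      · simp_all [List.isEmpty_iff]
      · simp_all [List.isEmpty_iff]
    · simp only [Bool.not_eq_true] at hsp
      have hns : pvSpecialChars.contains c = false := by
        cases hcc : pvSpecialChars.contains c <;> simp_all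
      simp only [hsp, if_neg, Bool.false_eq_true, not_false_iff,
        pvSubst_of_not_special c hns, ih (c :: cur) acc]
      simp

lemma pvScan_no_nil : ∀ (cs buf : List Char), [] ∉ pvScanB cs buf := by
  intro cs
  induction cs with
  | nil =>
    intro buf
    by_cases h : buf.isEmpty <;> simp_all [pvScanB, List.isEmpty_iff]
  | cons c t ih =>
    intro buf
    simp only [pvScanB]
    by_cases hsp : (pvSpecialChars.contains c || PySem.Chars.isspace c) <;>
      by_cases hc : buf.isEmpty <;> simp_all [List.isEmpty_iff]

-- ===== VERDICT (by name: the statement is the Claim_ definition above) =====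
theorem escape_fts_query_py_spec : Claim_equal_escape_fts_query_py := by
  intro q _
  unfold Spec_escape_fts_query_py escape_fts_query_py escape_fts_query_py_alt
  simp only []
  have hwords : PySem.Str.split₀
      (["\"", "'", "(", ")", "*", "-", "+", ":", "^", "~"].foldl
        (fun e ch => PySem.Str.replace e ch " ") q)
      = (pvScanB q.toList []).map String.ofList := by
    unfold PySem.Str.split₀
    rw [pvEscaped_toList]
    have := pvSplit_go_scan q.toList [] []
    simp only [PySem.Chars.split₀]
    simp [this]
  rw [hwords]
  by_cases hE : (pvScanB q.toList []).isEmpty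
  · simp [hE]
  · simp only [List.isEmpty_iff] at hE
    have hnn : ∀ w ∈ pvScanB q.toList [], w ≠ [] :=
      fun w hw hwe => pvScan_no_nil q.toList [] (hwe ▸ hw)
    have hfilter : ((pvScanB q.toList []).map String.ofList).filter (fun w => w ≠ "") =
        (pvScanB q.toList []).map String.ofList := by
      refine List.filter_eq_self.2 ?_
      intro s hs
      simp only [List.mem_map] at hs
      obtain ⟨w, hw, rfl⟩ := hs
      have := hnn w hw
      simp only [decide_eq_true_eq, ne_eq]
      intro hcon
      apply this
      have := congrArg String.toList hcon
      simpa using this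
    simp only [List.isEmpty_iff, List.map_eq_nil_iff]
    rw [hfilter]
    simp only [hE, List.map_map]
    rfl
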